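-- pv_equiv track=rewrite | github.com/sean2474/gd-ai-designer | ml/scripts/strip_decoration_test.py | _force_visible
-- ===== SOURCE A (Python) =====
-- _DROP_KEYS_FOR_VISIBILITY = frozenset({"35", "21", "22"})
--
-- def _force_visible(seg: str) -> str:
--     parts = seg.split(",")
--     out: list[str] = []
--     i = 0
--     while i + 1 < len(parts):
--         if parts[i] in _DROP_KEYS_FOR_VISIBILITY:
--             i += 2
--             continue
--         out.append(parts[i])
--         out.append(parts[i + 1])
--         i += 2
--     # If there's a trailing key with no value (shouldn't normally happen), keep it.
--     if i < len(parts):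
--         out.append(parts[i])
--     return ",".join(out)
-- ===== SOURCE B (Python) =====
-- _DROP_KEYS_FOR_VISIBILITY = frozenset({"35", "21", "22"})
--
-- def _force_visible(seg: str) -> str:
--     # Mark-then-sweep: first pass records the indices of dropped key/value
--     # slots in a set; second pass keeps every token whose index is unmarked
--     # (a trailing unpaired token is never marked, so it needs no special case).
--     parts = seg.split(",")
--     dropped = set()
--     for i, tok in enumerate(parts[:-1]):
--         if i % 2 == 0 and tok in _DROP_KEYS_FOR_VISIBILITY:
--             dropped.update((i, i + 1))
--     return ",".join(tok for i, tok in enumerate(parts) if i not in dropped)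
-- ===== Notes on version B (the rewrite author's own statement) =====
-- stated objective: alternative
-- what changed: replaces A's single index-stepping while-loop that emits surviving pairs with a mark-then-sweep strategy: a first pass records the indices of dropped key/value slots in a set, a second pass keeps every token whose index is unmarked, so the trailing unpaired token needs no special case
import Mathlib
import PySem

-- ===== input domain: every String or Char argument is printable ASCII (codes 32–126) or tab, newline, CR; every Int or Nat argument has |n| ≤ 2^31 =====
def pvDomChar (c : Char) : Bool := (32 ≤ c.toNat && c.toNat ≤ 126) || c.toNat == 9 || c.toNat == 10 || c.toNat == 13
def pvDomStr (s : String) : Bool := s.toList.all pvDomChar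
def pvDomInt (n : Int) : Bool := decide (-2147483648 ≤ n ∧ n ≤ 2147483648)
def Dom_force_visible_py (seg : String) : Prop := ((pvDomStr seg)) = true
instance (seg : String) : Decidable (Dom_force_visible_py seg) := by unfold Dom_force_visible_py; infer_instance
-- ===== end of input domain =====

-- B replaces A's index-stepping while-loop by a mark-then-sweep pass: a set of dropped
-- indices is built first, then every token with an unmarked index is kept (alternative; same cost).

-- ===== PORT A =====
-- frozenset({"35", "21", "22"})
def pvDropKeys : PySem.Set String := PySem.Set.ofList ["35", "21", "22"]

-- A's while-loop: i steps by 2, so it is structural recursion consuming two elements at a time;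
-- the final 'if i < len(parts)' is the single-leftover case.
def pvLoopA : List String → List String → List String
  | k :: v :: rest, out =>
      if PySem.Set.contains pvDropKeys k then pvLoopA rest out
      else pvLoopA rest (out ++ [k, v])
  | [k], out => out ++ [k]
  | [], out => out

def force_visible_py (seg : String) : String :=
  PySem.Str.join "," (pvLoopA ((PySem.Str.split? seg ",").getD []) [])

-- ===== PORT B =====
-- the loop body of B's marking pass: on (i, tok), if i % 2 == 0 and tok is a drop key,
-- dropped.update((i, i + 1))
def pvMark (acc : PySem.Set Int) (ip : Int × String) : PySem.Set Int :=
  if PySem.Int.mod ip.1 2 = 0 ∧ PySem.Set.contains pvDropKeys ip.2 = true then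
    PySem.Set.update acc [ip.1, ip.1 + 1]
  else acc

def force_visible_py_alt (seg : String) : String :=
  let parts := (PySem.Str.split? seg ",").getD []
  -- for i, tok in enumerate(parts[:-1]): …
  let dropped := (PySem.List.enumerate (PySem.List.slice parts none (some (-1))) 0).foldl pvMark PySem.Set.empty
  -- ",".join(tok for i, tok in enumerate(parts) if i not in dropped)
  PySem.Str.join "," ((PySem.List.enumerate parts 0).filterMap
      (fun ip => if PySem.Set.contains dropped ip.1 then none else some ip.2))

-- ===== PRECONDITION & SPEC =====
def Spec_force_visible_py (seg : String) (out : String) : Prop := out = force_visible_py_alt seg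
instance (seg : String) (out : String) : Decidable (Spec_force_visible_py seg out) := by unfold Spec_force_visible_py; infer_instance

-- ===== CLAIM (what is proved, stated in full; the proofs are below) =====
def Claim_equal_force_visible_py : Prop := ∀ (seg : String), Dom_force_visible_py seg → Spec_force_visible_py seg (force_visible_py seg)

-- ===== LEMMAS AND PROOFS =====


theorem pvLoopA_acc : ∀ (parts out : List String),
    pvLoopA parts out = out ++ pvLoopA parts []
  | k :: v :: rest, out => by
      simp only [pvLoopA]
      split
      · exact pvLoopA_acc rest out
      · simp only [List.nil_append]
        rw [pvLoopA_acc rest (out ++ [k, v]), pvLoopA_acc rest [k, v]]; simp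
  | [k], out => by simp [pvLoopA]
  | [], out => by simp [pvLoopA]

-- the marking pass as a function of list, start index and accumulated set
def pvMarkAll (ps : List String) (s : Int) (init : PySem.Set Int) : PySem.Set Int :=
  (PySem.List.enumerate ps s).foldl pvMark init

theorem pvMarkAll_nil (s : Int) (init : PySem.Set Int) : pvMarkAll [] s init = init := by
  simp [pvMarkAll, PySem.List.enumerate_nil]

theorem pvMarkAll_cons (p : String) (ps : List String) (s : Int) (init : PySem.Set Int) :
    pvMarkAll (p :: ps) s init = pvMarkAll ps (s + 1) (pvMark init (s, p)) := by
  simp [pvMarkAll, PySem.List.enumerate_cons]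

theorem pvContains_mark (init : PySem.Set Int) (ip : Int × String) (j : Int) :
    (pvMark init ip).contains j = (init.contains j || (pvMark PySem.Set.empty ip).contains j) := by
  unfold pvMark
  split
  · simp [PySem.Set.update, PySem.Set.empty, PySem.Set.contains, Bool.or_assoc]
  · simp [PySem.Set.empty, PySem.Set.contains]

-- indices below the start offset are never marked
theorem pvMarkAll_low : ∀ (ps : List String) (s : Int) (init : PySem.Set Int) (j : Int),
    j < s → (pvMarkAll ps s init).contains j = init.contains j := by
  intro ps
  induction ps with
  | nil => intro s init j _; exact congrArg (fun t => PySem.Set.contains t j) (pvMarkAll_nil s init)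
  | cons p ps ih =>
      intro s init j hj
      rw [pvMarkAll_cons, ih (s + 1) _ j (by omega)]
      unfold pvMark
      split
      · have h1 : j ≠ s := by omega
        have h2 : j ≠ s + 1 := by omega
        simp [PySem.Set.update, h1, h2]
      · rfl

-- the marked set is the initial set united with the marks made from an empty set
theorem pvMarkAll_split : ∀ (ps : List String) (s : Int) (init : PySem.Set Int) (j : Int),
    (pvMarkAll ps s init).contains j
      = (init.contains j || (pvMarkAll ps s PySem.Set.empty).contains j) := by
  intro ps
  induction ps with
  | nil => intro s init j; rw [pvMarkAll_nil, pvMarkAll_nil]; simp [PySem.Set.empty, PySem.Set.contains]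
  | cons p ps ih =>
      intro s init j
      rw [pvMarkAll_cons p ps s init, pvMarkAll_cons p ps s PySem.Set.empty,
        ih (s + 1) (pvMark init (s, p)) j, ih (s + 1) (pvMark PySem.Set.empty (s, p)) j,
        pvContains_mark]
      rw [Bool.or_assoc]

theorem pvFst_enumerate_ge {xs : List String} {s : Int} {ip : Int × String}
    (h : ip ∈ PySem.List.enumerate xs s) : s ≤ ip.1 := by
  have h1 : ip.1 ∈ (PySem.List.enumerate xs s).map (·.1) := List.mem_map_of_mem h
  rw [PySem.List.map_fst_enumerate] at h1
  exact (PySem.List.mem_pyRange_one.mp h1).1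

-- the main correspondence: B's sweep over the marked set computes A's loop
theorem pvB_eq_A : ∀ (parts : List String) (s : Int), s % 2 = 0 →
    (PySem.List.enumerate parts s).filterMap
        (fun ip => if PySem.Set.contains (pvMarkAll parts.dropLast s PySem.Set.empty) ip.1
                   then none else some ip.2)
      = pvLoopA parts []
  | [], s, hs => by simp [PySem.List.enumerate_nil, pvLoopA]
  | [k], s, hs => by
      simp [PySem.List.enumerate_cons, PySem.List.enumerate_nil, pvLoopA, pvMarkAll_nil,
        PySem.Set.empty, PySem.Set.contains]
  | k :: v :: rest, s, hs => by
      have hmods : PySem.Int.mod s 2 = 0 := by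
        rw [PySem.Int.mod_eq_emod_of_pos (by norm_num)]; omega
      have hmods1 : ¬ (PySem.Int.mod (s + 1) 2 = 0) := by
        rw [PySem.Int.mod_eq_emod_of_pos (by norm_num)]; omega
      cases rest with
      | nil =>
          -- parts = [k, v]: the marking pass sees only (s, k)
          simp only [List.dropLast, pvMarkAll_cons, pvMarkAll_nil,
            PySem.List.enumerate_cons, PySem.List.enumerate_nil, List.filterMap]
          by_cases hk : PySem.Set.contains pvDropKeys k = true
          · have hk' : k ∈ pvDropKeys := by simpa using hk
            have hc : pvMark PySem.Set.empty (s, k) = PySem.Set.update PySem.Set.empty [s, s + 1] := by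
              unfold pvMark; rw [if_pos ⟨hmods, hk⟩]
            rw [hc]
            simp [PySem.Set.update, PySem.Set.empty, PySem.Set.contains,
              pvLoopA, hk']
          · have hk' : k ∉ pvDropKeys := by simpa using hk
            have hc : pvMark PySem.Set.empty (s, k) = PySem.Set.empty := by
              unfold pvMark
              rw [if_neg (by intro h; exact hk h.2)]
            rw [hc]
            simp [PySem.Set.empty, PySem.Set.contains, pvLoopA, hk']
      | cons r rs =>
          -- parts = k :: v :: r :: rs; dropLast = k :: v :: dropLast (r :: rs)
          have hv : pvMark (pvMark PySem.Set.empty (s, k)) (s + 1, v)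
              = pvMark PySem.Set.empty (s, k) := by
            unfold pvMark
            rw [if_neg (by intro h; exact hmods1 h.1)]
          have hset : pvMarkAll (k :: v :: r :: rs).dropLast s PySem.Set.empty
              = pvMarkAll (r :: rs).dropLast (s + 2) (pvMark PySem.Set.empty (s, k)) := by
            rw [show (k :: v :: r :: rs).dropLast = k :: v :: (r :: rs).dropLast from by
                  simp [List.dropLast],
                pvMarkAll_cons, pvMarkAll_cons, hv, show s + 1 + 1 = s + 2 from by ring]
          rw [hset]
          have hsplit : ∀ j : Int,
              (pvMarkAll (r :: rs).dropLast (s + 2) (pvMark PySem.Set.empty (s, k))).contains j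
                = ((pvMark PySem.Set.empty (s, k)).contains j
                    || (pvMarkAll (r :: rs).dropLast (s + 2) PySem.Set.empty).contains j) :=
            fun j => pvMarkAll_split _ _ _ j
          have ih := pvB_eq_A (r :: rs) (s + 2) (by omega)
          by_cases hk : PySem.Set.contains pvDropKeys k = true
          · have hc : pvMark PySem.Set.empty (s, k) = PySem.Set.update PySem.Set.empty [s, s + 1] := by
              unfold pvMark; rw [if_pos ⟨hmods, hk⟩]
            have hlow : ∀ j : Int, (pvMark PySem.Set.empty (s, k)).contains j = true → j < s + 2 := by
              intro j hj
              rw [hc] at hj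
              simp [PySem.Set.update, PySem.Set.empty, PySem.Set.contains] at hj
              omega
            have hcs : (pvMarkAll (r :: rs).dropLast (s + 2)
                (pvMark PySem.Set.empty (s, k))).contains s = true := by
              rw [hsplit s, hc]
              simp [PySem.Set.update, PySem.Set.empty, PySem.Set.contains]
            have hcs1 : (pvMarkAll (r :: rs).dropLast (s + 2)
                (pvMark PySem.Set.empty (s, k))).contains (s + 1) = true := by
              rw [hsplit (s + 1), hc]
              simp [PySem.Set.update, PySem.Set.empty, PySem.Set.contains]
            have htail : (PySem.List.enumerate (r :: rs) (s + 2)).filterMap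
                (fun ip => if (pvMarkAll (r :: rs).dropLast (s + 2)
                    (pvMark PySem.Set.empty (s, k))).contains ip.1 then none else some ip.2)
                = pvLoopA (r :: rs) [] := by
              rw [← ih]
              apply List.filterMap_congr
              intro ip hip
              have hge : s + 2 ≤ ip.1 := pvFst_enumerate_ge hip
              have hfalse : (pvMark PySem.Set.empty (s, k)).contains ip.1 = false := by
                rcases h : (pvMark PySem.Set.empty (s, k)).contains ip.1 with _ | _
                · rfl
                · exact absurd (hlow ip.1 h) (by omega)
              simp only [hsplit ip.1, hfalse, Bool.false_or]
            have hcsm : s ∈ pvMarkAll (r :: rs).dropLast (s + 2)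
                (pvMark PySem.Set.empty (s, k)) := by simpa using hcs
            have hcs1m : s + 1 ∈ pvMarkAll (r :: rs).dropLast (s + 2)
                (pvMark PySem.Set.empty (s, k)) := by simpa using hcs1
            rw [PySem.List.enumerate_cons, List.filterMap_cons_none (by simpa using hcsm),
                PySem.List.enumerate_cons, List.filterMap_cons_none (by simpa using hcs1m),
                show s + 1 + 1 = s + 2 from by ring, htail]
            have hk' : k ∈ pvDropKeys := by simpa using hk
            have hA : pvLoopA (k :: v :: r :: rs) [] = pvLoopA (r :: rs) [] := by
              simp [pvLoopA, hk']
            rw [hA]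
          · have hc : pvMark PySem.Set.empty (s, k) = PySem.Set.empty := by
              unfold pvMark
              rw [if_neg (by intro h; exact hk h.2)]
            have hlow : ∀ j : Int, (pvMark PySem.Set.empty (s, k)).contains j = true → j < s + 2 := by
              intro j hj
              rw [hc] at hj
              simp [PySem.Set.empty, PySem.Set.contains] at hj
            have hcs : (pvMarkAll (r :: rs).dropLast (s + 2)
                (pvMark PySem.Set.empty (s, k))).contains s = false := by
              rw [hsplit s, hc]
              have := pvMarkAll_low (r :: rs).dropLast (s + 2) PySem.Set.empty s (by omega)
              simp [PySem.Set.empty, PySem.Set.contains] at this ⊢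
              exact this
            have hcs1 : (pvMarkAll (r :: rs).dropLast (s + 2)
                (pvMark PySem.Set.empty (s, k))).contains (s + 1) = false := by
              rw [hsplit (s + 1), hc]
              have := pvMarkAll_low (r :: rs).dropLast (s + 2) PySem.Set.empty (s + 1) (by omega)
              simp [PySem.Set.empty, PySem.Set.contains] at this ⊢
              exact this
            have htail : (PySem.List.enumerate (r :: rs) (s + 2)).filterMap
                (fun ip => if (pvMarkAll (r :: rs).dropLast (s + 2)
                    (pvMark PySem.Set.empty (s, k))).contains ip.1 then none else some ip.2)
                = pvLoopA (r :: rs) [] := by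
              rw [← ih]
              apply List.filterMap_congr
              intro ip hip
              have hfalse : (pvMark PySem.Set.empty (s, k)).contains ip.1 = false := by
                rw [hc]; simp [PySem.Set.empty, PySem.Set.contains]
              simp only [hsplit ip.1, hfalse, Bool.false_or]
            have hcsm : s ∉ pvMarkAll (r :: rs).dropLast (s + 2)
                (pvMark PySem.Set.empty (s, k)) := by simpa using hcs
            have hcs1m : s + 1 ∉ pvMarkAll (r :: rs).dropLast (s + 2)
                (pvMark PySem.Set.empty (s, k)) := by simpa using hcs1
            rw [PySem.List.enumerate_cons, List.filterMap_cons_some (b := k) (by simpa using hcsm),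
                PySem.List.enumerate_cons, List.filterMap_cons_some (b := v) (by simpa using hcs1m),
                show s + 1 + 1 = s + 2 from by ring, htail]
            have hk' : k ∉ pvDropKeys := by simpa using hk
            have hA : pvLoopA (k :: v :: r :: rs) [] = pvLoopA (r :: rs) ([] ++ [k, v]) := by
              simp [pvLoopA, hk']
            rw [hA, pvLoopA_acc (r :: rs) ([] ++ [k, v])]
            simp
  termination_by parts => parts.length

-- ===== VERDICT (by name: the statement is the Claim_ definition above) =====
theorem force_visible_py_spec : Claim_equal_force_visible_py := by
  intro seg _
  unfold Spec_force_visible_py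
  simp only [force_visible_py, force_visible_py_alt, PySem.List.slice_to_neg_one]
  rw [show List.foldl pvMark PySem.Set.empty
        (PySem.List.enumerate (((PySem.Str.split? seg ",").getD []).dropLast))
      = pvMarkAll ((PySem.Str.split? seg ",").getD []).dropLast 0 PySem.Set.empty from rfl,
     pvB_eq_A _ 0 (by norm_num)]
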